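-- pv_equiv track=rewrite | github.com/jsysunny/Coding | baekjoon_silver.py | solve
-- ===== SOURCE A (Python) =====
-- def solve(N, room):
--     # 가로로 누울 수 있는 자리 (이중 리스트 행 기준)
--     horizontal_count = 0
--     for row in room:
--         continuous = 0  # 연속된 '.' 개수
--         for char in row:
--             if char == '.':
--                 continuous += 1
--             else:  # 'X'를 만나면 확인 후 초기화
--                 if continuous >= 2:
--                     horizontal_count += 1
--                 continuous = 0
--         # 행 끝이 '.'으로 끝난 경우도 확인
--         if continuous >= 2:
--             horizontal_count += 1
--
--     # 세로로 누울 수 있는 자리 (이중 리스트 열 기준)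
--     vertical_count = 0
--     for col in range(N):
--         continuous = 0
--         for row_idx in range(N):
--             if room[row_idx][col] == '.':
--                 continuous += 1
--             else:
--                 if continuous >= 2:
--                     vertical_count += 1
--                 continuous = 0
--         if continuous >= 2:
--             vertical_count += 1
--
--     # 두 개의 값을 한꺼번에 반환
--     return horizontal_count, vertical_count
-- ===== SOURCE B (Python) =====
-- def solve(N, room):
--     # Count each maximal run of >=2 dots by detecting its start (pad with a
--     # non-dot sentinel), instead of maintaining a running counter with flushes.
--     def runs2(cells):
--         return sum(1 for p, a, b in zip(['X'] + cells, cells, cells[1:])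
--                    if p != '.' and a == '.' and b == '.')
--     horizontal = sum(runs2(row) for row in room)
--     vertical = sum(runs2([room[i][j] for i in range(N)]) for j in range(N))
--     return horizontal, vertical
-- ===== Notes on version B (the rewrite author's own statement) =====
-- stated objective: simpler
-- what changed: Replaces A's running-counter-with-flush accumulator loops (duplicated for rows and columns) by one helper that counts run starts locally: a run of >=2 dots is counted where a dot followed by a dot is not preceded by a dot (sentinel padding + zip), applied to each row and to each extracted column.
import Mathlib
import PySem

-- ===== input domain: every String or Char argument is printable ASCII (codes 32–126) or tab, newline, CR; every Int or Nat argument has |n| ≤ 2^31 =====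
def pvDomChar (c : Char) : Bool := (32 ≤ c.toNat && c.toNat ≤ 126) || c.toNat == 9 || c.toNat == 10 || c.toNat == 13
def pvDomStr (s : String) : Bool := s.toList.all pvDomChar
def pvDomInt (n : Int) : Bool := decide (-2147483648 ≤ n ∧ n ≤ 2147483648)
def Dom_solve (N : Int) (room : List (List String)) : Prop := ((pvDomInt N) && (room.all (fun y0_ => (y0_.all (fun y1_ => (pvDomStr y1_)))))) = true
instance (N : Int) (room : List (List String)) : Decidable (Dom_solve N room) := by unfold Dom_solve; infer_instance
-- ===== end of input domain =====

-- B replaces A's running-counter/flush accumulator loops by counting each run of ≥2 dots at its start (sentinel padding + zip of shifted lists); objective: simpler.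

-- ===== PORT A =====
-- the body of both of A's inner loops: '.' extends the run, anything else flushes it
def pvStep (st : Int × Int) (c : String) : Int × Int :=
  if c = "." then (st.1 + 1, st.2)
  else if st.1 ≥ 2 then (0, st.2 + 1) else (0, st.2)

-- A's 'if continuous >= 2' check after the end of each row/column
def pvFlush (st : Int × Int) : Int :=
  if st.1 ≥ 2 then st.2 + 1 else st.2

def solve (N : Int) (room : List (List String)) : Int × Int :=
  let h := room.foldl (fun acc row => pvFlush (row.foldl pvStep (0, acc))) 0
  let v := (PySem.List.pyRange 0 N 1).foldl (fun acc col =>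
      pvFlush ((PySem.List.pyRange 0 N 1).foldl
        (fun st ri => pvStep st (PySem.List.pyGetD (PySem.List.pyGetD room ri []) col "")) (0, acc))) 0
  (h, v)

-- ===== PORT B =====
-- runs2(cells): count the positions where a run of ≥ 2 dots starts ('X'-padded zip of shifted lists)
def runs2Alt (cells : List String) : Int :=
  (((("X" :: cells).zip (cells.zip (cells.drop 1))).countP
    (fun t => !(t.1 == ".") && (t.2.1 == ".") && (t.2.2 == "."))) : Int)

def solve_alt (N : Int) (room : List (List String)) : Int × Int :=
  ((room.map runs2Alt).sum,
   ((PySem.List.pyRange 0 N 1).map (fun j =>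
       runs2Alt ((PySem.List.pyRange 0 N 1).map (fun i =>
         PySem.List.pyGetD (PySem.List.pyGetD room i []) j "")))).sum)

-- ===== PRECONDITION & SPEC =====
-- Pre_ excludes exactly the inputs where A's vertical pass raises IndexError:
-- room[row_idx][col] for row_idx, col in range(N) needs at least N rows, the first N of them at least N wide.
def Pre_solve (N : Int) (room : List (List String)) : Prop :=
  N ≤ (room.length : Int) ∧ ∀ row ∈ room.take N.toNat, N ≤ (row.length : Int)
instance (N : Int) (room : List (List String)) : Decidable (Pre_solve N room) := by
  unfold Pre_solve; infer_instance

def pvWitness_solve : Int × List (List String) := (2, [[".", "."], [".", "X"]])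

def Spec_solve (N : Int) (room : List (List String)) (out : Int × Int) : Prop := out = solve_alt N room
instance (N : Int) (room : List (List String)) (out : Int × Int) : Decidable (Spec_solve N room out) := by unfold Spec_solve; infer_instance

-- ===== CLAIM (what is proved, stated in full; the proofs are below) =====
def Claim_equal_solve : Prop := ∀ (N : Int) (room : List (List String)), Dom_solve N room → Pre_solve N room → Spec_solve N room (solve N room)

-- ===== LEMMAS AND PROOFS =====

-- A's per-line loop: the pending-run length and the flush, as a recursion on the remaining cells
def pvT (cont : Int) : List String → Int
  | [] => if 2 ≤ cont then 1 else 0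
  | c :: rest => if c = "." then pvT (cont + 1) rest else (if 2 ≤ cont then 1 else 0) + pvT 0 rest

-- B's per-line count, with the padding element generalized to the previous cell
def pvZ : String → List String → Int
  | _, [] => 0
  | _, [_] => 0
  | x, a :: b :: r => (if x ≠ "." ∧ a = "." ∧ b = "." then 1 else 0) + pvZ a (b :: r)

theorem foldl_pvStep_eq_pvT (cells : List String) :
    ∀ (cont cnt : Int), pvFlush (cells.foldl pvStep (cont, cnt)) = cnt + pvT cont cells := by
  induction cells with
  | nil => intro cont cnt; simp [pvFlush, pvT]; split_ifs <;> ring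
  | cons c rest ih =>
      intro cont cnt
      by_cases hc : c = "."
      · simp [List.foldl, pvStep, pvT, hc, ih]
      · by_cases h2 : (2 : Int) ≤ cont
        · simp [List.foldl, pvStep, pvT, hc, h2, ih]; ring
        · simp [List.foldl, pvStep, pvT, hc, h2, ih]

theorem pvT_eq_pvZ (cells : List String) :
    ∀ (cont : Int) (x : String), 0 ≤ cont → (1 ≤ cont ↔ x = ".") →
      pvT cont cells = (if 2 ≤ cont ∨ (1 ≤ cont ∧ cells.head? = some ".") then 1 else 0) + pvZ x cells := by
  induction cells with
  | nil =>
      intro cont x hc hx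
      simp only [pvT, pvZ, List.head?]
      have h1 : (2 ≤ cont ∨ 1 ≤ cont ∧ (none : Option String) = some ".") ↔ 2 ≤ cont := by simp
      simp only [h1]
      omega
  | cons a rest ih =>
      intro cont x hc hx
      by_cases ha : a = "."
      · have ih' := ih (cont + 1) a (by omega) (by simp [ha]; omega)
        simp only [pvT, if_pos ha]
        rw [ih']
        cases rest with
        | nil =>
            by_cases h1 : (1:Int) ≤ cont
            · simp [pvZ, List.head?, ha, h1]; omega
            · simp [pvZ, List.head?, ha, h1]; omega
        | cons b r =>
            by_cases h1 : (1:Int) ≤ cont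
            · have hx' : x = "." := hx.mp h1
              by_cases hb : b = "."
              · simp [pvZ, List.head?, ha, hb, hx', h1]; omega
              · simp [pvZ, List.head?, ha, hb, hx', h1]; omega
            · have hx' : x ≠ "." := fun h => h1 (hx.mpr h)
              by_cases hb : b = "."
              · simp [pvZ, List.head?, ha, hb, hx', h1]; omega
              · simp [pvZ, List.head?, ha, hb, hx', h1]; omega
      · have ih' := ih 0 a (le_refl 0) (by simp [ha])
        simp only [pvT, if_neg ha]
        rw [ih']
        cases rest with
        | nil =>
            simp only [pvZ, List.head?]
            have h2 : ¬(2 ≤ (0:Int) ∨ 1 ≤ (0:Int) ∧ (none : Option String) = some ".") := by simp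
            rw [if_neg h2]
            have h3 : (2 ≤ cont ∨ 1 ≤ cont ∧ some a = some ".") ↔ 2 ≤ cont := by
              simp [ha]
            simp only [h3]
            omega
        | cons b r =>
            have hz : pvZ x (a :: b :: r) = pvZ a (b :: r) := by
              simp [pvZ, ha]
            rw [hz]
            have h3 : (2 ≤ cont ∨ 1 ≤ cont ∧ (a :: b :: r).head? = some ".") ↔ 2 ≤ cont := by
              simp [ha]
            simp only [h3]
            by_cases hb : b = "."
            · simp [List.head?, hb]
            · simp [List.head?, hb]

theorem countP_eq_pvZ (cells : List String) :
    ∀ (x : String),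
      (((x :: cells).zip (cells.zip (cells.drop 1))).countP
        (fun t => !(t.1 == ".") && (t.2.1 == ".") && (t.2.2 == ".")) : Int) = pvZ x cells := by
  induction cells with
  | nil => intro x; simp [pvZ]
  | cons a rest ih =>
      intro x
      cases rest with
      | nil => simp [pvZ]
      | cons b r =>
          have ih' := ih a
          have hbp : ((!(x == ".") && (a == ".") && (b == ".")) = true) ↔ (x ≠ "." ∧ a = "." ∧ b = ".") := by
            simp [and_assoc]
          have hzip : (x :: a :: b :: r).zip ((a :: b :: r).zip ((a :: b :: r).drop 1))
              = (x, (a, b)) :: ((a :: b :: r).zip ((b :: r).zip ((b :: r).drop 1))) := rfl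
          rw [hzip, List.countP_cons]
          push_cast
          rw [ih']
          simp only [pvZ, hbp]
          split_ifs <;> ring

-- per-line equivalence: A's flush-loop on cells, started with count acc, equals acc + B's runs2
theorem line_eq (cells : List String) (acc : Int) :
    pvFlush (cells.foldl pvStep (0, acc)) = acc + runs2Alt cells := by
  rw [foldl_pvStep_eq_pvT]
  rw [pvT_eq_pvZ cells 0 "X" le_rfl (by simp)]
  simp only [runs2Alt, countP_eq_pvZ]
  simp

theorem foldl_line_eq (L : List (List String)) :
    ∀ (a : Int), L.foldl (fun acc row => pvFlush (row.foldl pvStep (0, acc))) a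
      = a + (L.map runs2Alt).sum := by
  induction L with
  | nil => intro a; simp
  | cons row rest ih =>
      intro a
      simp only [List.foldl, List.map, List.sum_cons]
      rw [ih, line_eq]
      ring

-- ===== VERDICT (by name: the statement is the Claim_ definition above) =====
theorem solve_spec : Claim_equal_solve := by
  intro N room _ _
  unfold Spec_solve solve solve_alt
  have hh : room.foldl (fun acc row => pvFlush (row.foldl pvStep (0, acc))) 0
      = (room.map runs2Alt).sum := by simpa using foldl_line_eq room 0
  have hv : (PySem.List.pyRange 0 N 1).foldl (fun acc col =>
        pvFlush ((PySem.List.pyRange 0 N 1).foldl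
          (fun st ri => pvStep st (PySem.List.pyGetD (PySem.List.pyGetD room ri []) col "")) (0, acc))) 0
      = ((PySem.List.pyRange 0 N 1).map (fun j =>
          runs2Alt ((PySem.List.pyRange 0 N 1).map (fun i =>
            PySem.List.pyGetD (PySem.List.pyGetD room i []) j "")))).sum := by
    calc (PySem.List.pyRange 0 N 1).foldl (fun acc col =>
          pvFlush ((PySem.List.pyRange 0 N 1).foldl
            (fun st ri => pvStep st (PySem.List.pyGetD (PySem.List.pyGetD room ri []) col "")) (0, acc))) 0
        = (PySem.List.pyRange 0 N 1).foldl (fun acc col =>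
            pvFlush (((PySem.List.pyRange 0 N 1).map (fun i =>
              PySem.List.pyGetD (PySem.List.pyGetD room i []) col "")).foldl pvStep (0, acc))) 0 := by
          refine List.foldl_ext _ _ 0 ?_
          intro acc col _
          rw [List.foldl_map]
      _ = ((PySem.List.pyRange 0 N 1).map (fun col => (PySem.List.pyRange 0 N 1).map (fun i =>
              PySem.List.pyGetD (PySem.List.pyGetD room i []) col ""))).foldl
            (fun acc cells => pvFlush (cells.foldl pvStep (0, acc))) 0 := by
          rw [List.foldl_map]
      _ = _ := by
          rw [foldl_line_eq]
          simp [List.map_map, Function.comp_def]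
  exact congrArg₂ Prod.mk hh hv
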